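-- pv_equiv track=rewrite | github.com/xifeng0126/MCM | lanqiao/test.py | max_mixed_doubles_advantage
-- ===== SOURCE A (Python) =====
-- def max_mixed_doubles_advantage(n, P, Q):
--     dp = [[0] * (1 << n) for _ in range(n)]  # dp[i][mask]表示前i个男选手已经被选中，状态为mask时的最大优势
--
--     for mask in range(1 << n):
--         for j in range(n):
--             if mask & (1 << j):  # 检查第j个男选手是否已被选中
--                 for i in range(n):
--                     if not (mask & (1 << i)):  # 检查第i个女选手是否已被选中
--                         dp[j][mask] = max(dp[j][mask], dp[j - 1][mask ^ (1 << j)] + P[j][i] * Q[i][j])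
--                     else:
--                         dp[j][mask] = max(dp[j][mask], dp[j - 1][mask ^ (1 << j)])
--
--     return max(dp[-1])  # 返回最后一个男选手全部被选中时的最大优势
-- ===== SOURCE B (Python) =====
-- def max_mixed_doubles_advantage(n, P, Q):
--     # Top-down memoized DP: solve(j, mask) = best advantage when man j is matched
--     # in state mask, pairing him with a free woman and recursing on the previous man.
--     memo = {}
--
--     def solve(j, mask):
--         if not (mask >> j) & 1:
--             return 0
--         key = (j, mask)
--         if key in memo:
--             return memo[key]
--         best = 0
--         for i in range(n):
--             if not (mask >> i) & 1:
--                 best = max(best, P[j][i] * Q[i][j])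
--         res = best if j == 0 else solve(j - 1, mask ^ (1 << j)) + best
--         memo[key] = res
--         return res
--
--     return max(solve(n - 1, mask) for mask in range(1 << n))
-- ===== Notes on version B (the rewrite author's own statement) =====
-- stated objective: alternative
-- what changed: Replaces A's bottom-up fill of an n x 2^n table (triple nested loop over masks, rows and partners) with a top-down memoized recursion solve(j, mask) with base case j == 0, taking the max of solve(n-1, mask) over all masks; Pre_ excludes n < 1, where A raises (IndexError/ValueError).
import Mathlib
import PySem

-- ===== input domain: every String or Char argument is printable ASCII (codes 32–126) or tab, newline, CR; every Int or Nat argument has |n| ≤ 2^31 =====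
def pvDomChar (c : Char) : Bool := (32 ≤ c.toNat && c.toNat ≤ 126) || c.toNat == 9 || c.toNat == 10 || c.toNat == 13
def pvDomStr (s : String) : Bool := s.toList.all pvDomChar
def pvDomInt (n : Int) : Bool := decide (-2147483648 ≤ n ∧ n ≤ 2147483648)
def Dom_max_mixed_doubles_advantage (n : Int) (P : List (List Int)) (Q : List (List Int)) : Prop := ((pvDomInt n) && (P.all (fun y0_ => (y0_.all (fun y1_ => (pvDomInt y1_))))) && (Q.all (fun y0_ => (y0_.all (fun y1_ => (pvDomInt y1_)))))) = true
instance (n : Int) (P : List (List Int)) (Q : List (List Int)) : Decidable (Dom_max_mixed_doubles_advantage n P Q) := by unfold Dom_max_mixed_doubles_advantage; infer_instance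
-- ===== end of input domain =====

-- B replaces A's bottom-up 2^n×n table fill by a top-down recursion solve(j, mask)
-- with base case j = 0 (memoized in Python); return values agree on Pre_.

-- ===== PORT A =====
-- dp[j - 1][mask ^ (1 << j)]  (Python's j-1 may be -1, wrapping to the last row: pyGet?)
def pvBase (dp : List (List Int)) (j mask : Nat) : Int :=
  ((PySem.List.pyGet? dp ((j : Int) - 1)).getD []).getD (mask ^^^ (1 <<< j)) 0

-- one iteration of A's innermost 'for i in range(n)' body (both branches assign
-- dp[j][mask] = max(dp[j][mask], candidate)); list reads use getD 0, exact under Pre_.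
def pvStepI (P Q : List (List Int)) (mask j : Nat) (dp : List (List Int)) (i : Nat) : List (List Int) :=
  let base := pvBase dp j mask
  let cur := (dp.getD j []).getD mask 0
  let cand := if ¬ mask.testBit i then base + ((P.getD j []).getD i 0) * ((Q.getD i []).getD j 0) else base
  dp.set j ((dp.getD j []).set mask (max cur cand))

-- body of 'for j in range(n)' ('if mask & (1 << j)' is the bit-j test)
def pvStepJ (P Q : List (List Int)) (N mask : Nat) (dp : List (List Int)) (j : Nat) : List (List Int) :=
  if mask.testBit j then (List.range N).foldl (pvStepI P Q mask j) dp else dp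

-- body of 'for mask in range(1 << n)'
def pvStepMask (P Q : List (List Int)) (N : Nat) (dp : List (List Int)) (mask : Nat) : List (List Int) :=
  (List.range N).foldl (pvStepJ P Q N mask) dp

-- literal port of A; masks/indices are Nats (exact: Pre_ gives n ≥ 1, so every Python
-- index here is ≥ 0, and 'mask & (1 << j)' tests bit j).
def max_mixed_doubles_advantage (n : Int) (P : List (List Int)) (Q : List (List Int)) : Int :=
  let N := n.toNat
  let dp0 : List (List Int) := List.replicate N (List.replicate (1 <<< N) 0)
  let dpf := (List.range (1 <<< N)).foldl (pvStepMask P Q N) dp0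
  (PySem.List.max? ((PySem.List.pyGet? dpf (-1)).getD []) (fun y => y)).getD 0

-- ===== PORT B =====
-- B's inner 'best' loop: best = max(best, P[j][i] * Q[i][j]) over free i
def pvGain (P Q : List (List Int)) (N j mask : Nat) : Int :=
  (List.range N).foldl (fun best i =>
    if ¬ mask.testBit i then max best (((P.getD j []).getD i 0) * ((Q.getD i []).getD j 0)) else best) 0

-- B's solve(j, mask) (structural recursion on j; Python's memoization is dropped,
-- the pure recursion computes the same values)
def pvSolveB (P Q : List (List Int)) (N j mask : Nat) : Int :=
  if mask.testBit j then
    let best := pvGain P Q N j mask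
    match j with
    | 0 => best
    | j' + 1 => pvSolveB P Q N j' (mask ^^^ (1 <<< (j' + 1))) + best
  else 0

def max_mixed_doubles_advantage_alt (n : Int) (P : List (List Int)) (Q : List (List Int)) : Int :=
  let N := n.toNat
  (PySem.List.max? ((List.range (1 <<< N)).map (fun mask => pvSolveB P Q N (N - 1) mask)) (fun y => y)).getD 0

-- ===== PRECONDITION & SPEC =====
-- Exactly where Python A returns: n ≥ 1 (n = 0 → IndexError on dp[-1], n < 0 →
-- ValueError on 1 << n); for n ≥ 2 an IndexError on P[j][i] / Q[i][j] is avoided iff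
-- P, Q have ≥ n rows, with rows 0..n-2 of length ≥ n and row n-1 of length ≥ n-1
-- (the pair (j, j) is never read); for n = 1, P and Q are never read at all.
def Pre_max_mixed_doubles_advantage (n : Int) (P : List (List Int)) (Q : List (List Int)) : Prop :=
  1 ≤ n ∧ (2 ≤ n →
    n ≤ (P.length : Int) ∧ n ≤ (Q.length : Int) ∧
    ∀ j : Nat, j < n.toNat →
      (if j = n.toNat - 1 then n.toNat - 1 else n.toNat) ≤ (P.getD j []).length ∧
      (if j = n.toNat - 1 then n.toNat - 1 else n.toNat) ≤ (Q.getD j []).length)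
instance (n : Int) (P : List (List Int)) (Q : List (List Int)) : Decidable (Pre_max_mixed_doubles_advantage n P Q) := by
  unfold Pre_max_mixed_doubles_advantage; infer_instance

def pvWitness_max_mixed_doubles_advantage : Int × List (List Int) × List (List Int) :=
  (2, [[3, 1], [2, 4]], [[1, 5], [2, 1]])

def Spec_max_mixed_doubles_advantage (n : Int) (P : List (List Int)) (Q : List (List Int)) (out : Int) : Prop := out = max_mixed_doubles_advantage_alt n P Q
instance (n : Int) (P : List (List Int)) (Q : List (List Int)) (out : Int) : Decidable (Spec_max_mixed_doubles_advantage n P Q out) := by unfold Spec_max_mixed_doubles_advantage; infer_instance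

-- ===== CLAIM (what is proved, stated in full; the proofs are below) =====
def Claim_equal_max_mixed_doubles_advantage : Prop := ∀ (n : Int) (P : List (List Int)) (Q : List (List Int)), Dom_max_mixed_doubles_advantage n P Q → Pre_max_mixed_doubles_advantage n P Q → Spec_max_mixed_doubles_advantage n P Q (max_mixed_doubles_advantage n P Q)

-- ===== LEMMAS AND PROOFS =====

theorem pvWitness_ok :
    Dom_max_mixed_doubles_advantage pvWitness_max_mixed_doubles_advantage.1 pvWitness_max_mixed_doubles_advantage.2.1 pvWitness_max_mixed_doubles_advantage.2.2 ∧
    Pre_max_mixed_doubles_advantage pvWitness_max_mixed_doubles_advantage.1 pvWitness_max_mixed_doubles_advantage.2.1 pvWitness_max_mixed_doubles_advantage.2.2 := by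
  constructor <;> decide

theorem pvXorLt (mask j : Nat) (h : mask.testBit j = true) : mask ^^^ (1 <<< j) < mask := by
  have h1 : (1 : Nat) <<< j = 2 ^ j := by simp [Nat.shiftLeft_eq]
  rw [h1]
  apply Nat.lt_of_testBit j
  · simp [Nat.testBit_xor, h]
  · exact h
  · intro k hk
    simp [Nat.testBit_xor, Nat.testBit_two_pow_of_ne (by omega : j ≠ k)]

-- proof device: the value A's table entries actually carry (the j-1 read wraps mod n,
-- exactly as Python's dp[j - 1] does)
def pvSolveW (P Q : List (List Int)) (N j mask : Nat) : Int :=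
  if h : mask.testBit j = true then
    pvSolveW P Q N ((j + N - 1) % N) (mask ^^^ (1 <<< j)) + pvGain P Q N j mask
  else 0
termination_by mask
decreasing_by exact pvXorLt mask j h

-- table entry dp[j][mask] (rows/entries read with default, as in the ports)
def pvE (dp : List (List Int)) (j m : Nat) : Int := (dp.getD j []).getD m 0

-- candidate value of A's inner branch, with the base read fixed to b
def pvCand (P Q : List (List Int)) (j mask : Nat) (b : Int) (i : Nat) : Int :=
  if ¬ mask.testBit i then b + ((P.getD j []).getD i 0) * ((Q.getD i []).getD j 0) else b

def pvFoldA (P Q : List (List Int)) (j mask : Nat) (b : Int) (L : List Nat) (a : Int) : Int :=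
  L.foldl (fun acc i => max acc (pvCand P Q j mask b i)) a

-- L1: reading row j-1 with Python's wraparound
theorem pvPrevRow (dp : List (List Int)) (N j : Nat) (hlen : dp.length = N) (hN : 1 ≤ N) (hj : j < N) :
    (PySem.List.pyGet? dp ((j : Int) - 1)).getD [] = dp.getD ((j + N - 1) % N) [] := by
  cases j with
  | zero =>
    have h1 : ((0 : Nat) : Int) - 1 = -1 := by norm_num
    have h2 : (0 + N - 1) % N = N - 1 := by
      rw [Nat.zero_add]; exact Nat.mod_eq_of_lt (by omega)
    rw [h1, PySem.List.pyGet?_neg_one, List.getLast?_eq_getElem?, h2, List.getD_eq_getElem?_getD, hlen]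
  | succ k =>
    have h1 : ((k + 1 : Nat) : Int) - 1 = (k : Int) := by push_cast; ring
    have h2 : (k + 1 + N - 1) % N = k := by
      rw [show k + 1 + N - 1 = k + N by omega, Nat.add_mod_right, Nat.mod_eq_of_lt (by omega)]
    rw [h1, PySem.List.pyGet?_natCast, h2, List.getD_eq_getElem?_getD]

theorem pvFoldl_ge (f : Int → Nat → Int) (hf : ∀ a i, a ≤ f a i) (L : List Nat) :
    ∀ a, a ≤ L.foldl f a := by
  induction L with
  | nil => intro a; simp
  | cons i L ih => intro a; exact le_trans (hf a i) (ih (f a i))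

theorem pvGain_nonneg (P Q : List (List Int)) (N j mask : Nat) : 0 ≤ pvGain P Q N j mask := by
  apply pvFoldl_ge
  intro a i
  by_cases h : mask.testBit i <;> simp [h]

theorem pvSolveW_nonneg (P Q : List (List Int)) (N : Nat) : ∀ mask j, 0 ≤ pvSolveW P Q N j mask := by
  intro mask
  induction mask using Nat.strong_induction_on with
  | _ mask ih =>
    intro j
    rw [pvSolveW]
    split
    · next h => exact add_nonneg (ih _ (pvXorLt mask j h) _) (pvGain_nonneg P Q N j mask)
    · exact le_refl 0

theorem pvFoldA_max (P Q : List (List Int)) (j mask : Nat) (b : Int) (L : List Nat) :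
    ∀ a x, pvFoldA P Q j mask b L (max a x) = max a (pvFoldA P Q j mask b L x) := by
  induction L with
  | nil => intro a x; rfl
  | cons i L ih =>
    intro a x
    show pvFoldA P Q j mask b L (max (max a x) _) = _
    rw [max_assoc, ih]
    rfl

theorem pvFoldA_ge_mem (P Q : List (List Int)) (j mask : Nat) (b : Int) (L : List Nat) (i : Nat)
    (hi : i ∈ L) : ∀ a, pvCand P Q j mask b i ≤ pvFoldA P Q j mask b L a := by
  induction L with
  | nil => cases hi
  | cons k L ih =>
    intro a
    rcases List.mem_cons.mp hi with h | h
    · subst h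
      refine le_trans (le_max_right a _) ?_
      exact pvFoldl_ge _ (fun a' i' => le_max_left _ _) L _
    · exact ih h _

theorem pvFoldA_shift (P Q : List (List Int)) (j mask : Nat) (b : Int) (L : List Nat) :
    ∀ best, 0 ≤ best →
      pvFoldA P Q j mask b L (b + best)
        = b + L.foldl (fun best i =>
            if ¬ mask.testBit i then max best (((P.getD j []).getD i 0) * ((Q.getD i []).getD j 0)) else best) best := by
  induction L with
  | nil => intro best _; rfl
  | cons i L ih =>
    intro best hb
    show pvFoldA P Q j mask b L (max (b + best) (pvCand P Q j mask b i)) = _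
    by_cases h : mask.testBit i
    · have h1 : pvCand P Q j mask b i = b := by simp [pvCand, h]
      have h2 : max (b + best) b = b + best := by
        rw [max_eq_left]; omega
      rw [h1, h2, ih best hb]
      simp [h]
    · have h1 : pvCand P Q j mask b i = b + ((P.getD j []).getD i 0) * ((Q.getD i []).getD j 0) := by
        simp [pvCand, h]
      rw [h1, max_add_add_left, ih _ (le_trans hb (le_max_left _ _))]
      simp [h]

theorem pvFoldA_main (P Q : List (List Int)) (j mask : Nat) (b : Int) (L : List Nat)
    (hb : 0 ≤ b) (hj : j ∈ L) (hbit : mask.testBit j = true) :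
    pvFoldA P Q j mask b L 0
      = b + L.foldl (fun best i =>
          if ¬ mask.testBit i then max best (((P.getD j []).getD i 0) * ((Q.getD i []).getD j 0)) else best) 0 := by
  have h1 := pvFoldA_shift P Q j mask b L 0 (le_refl 0)
  rw [add_zero] at h1
  have h2 : pvFoldA P Q j mask b L b = max b (pvFoldA P Q j mask b L 0) := by
    have := pvFoldA_max P Q j mask b L b 0
    rwa [max_eq_left hb] at this
  have h3 : b ≤ pvFoldA P Q j mask b L 0 := by
    have h4 := pvFoldA_ge_mem P Q j mask b L j hj 0
    have h5 : pvCand P Q j mask b j = b := by simp [pvCand, hbit]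
    rwa [h5] at h4
  have h6 : max b (pvFoldA P Q j mask b L 0) = pvFoldA P Q j mask b L 0 := max_eq_right h3
  rw [← h6, ← h2, h1]

-- mask ^ (1 << j) differs from mask
theorem pvXorNe (mask j : Nat) : mask ^^^ (1 <<< j) ≠ mask := by
  intro he
  have h1 : (mask ^^^ (1 <<< j)).testBit j = mask.testBit j := by rw [he]
  have h2 : (1 : Nat) <<< j = 2 ^ j := by simp [Nat.shiftLeft_eq]
  rw [h2] at h1
  simp [Nat.testBit_xor] at h1

theorem pvGetD_set_self (l : List Int) (i : Nat) (v : Int) (h : i < l.length) :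
    (l.set i v).getD i 0 = v := by
  rw [List.getD_eq_getElem?_getD, List.getElem?_set_self h]; rfl

theorem pvGetD_set_ne (l : List Int) (i k : Nat) (v : Int) (h : i ≠ k) :
    (l.set i v).getD k 0 = l.getD k 0 := by
  rw [List.getD_eq_getElem?_getD, List.getElem?_set_ne h, ← List.getD_eq_getElem?_getD]

theorem pvRowGetD_set_self (dp : List (List Int)) (j : Nat) (r : List Int) (h : j < dp.length) :
    (dp.set j r).getD j [] = r := by
  rw [List.getD_eq_getElem?_getD, List.getElem?_set_self h]; rfl

theorem pvRowGetD_set_ne (dp : List (List Int)) (j k : Nat) (r : List Int) (h : j ≠ k) :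
    (dp.set j r).getD k [] = dp.getD k [] := by
  rw [List.getD_eq_getElem?_getD, List.getElem?_set_ne h, ← List.getD_eq_getElem?_getD]

-- L2: the inner i-loop only rewrites entry (j, mask), with a running max
theorem pvIFold (P Q : List (List Int)) (mask j N : Nat) (hN : 1 ≤ N) (hj : j < N) (L : List Nat) :
    ∀ dp : List (List Int), dp.length = N → mask < (dp.getD j []).length →
      L.foldl (pvStepI P Q mask j) dp
        = dp.set j ((dp.getD j []).set mask (pvFoldA P Q j mask (pvBase dp j mask) L (pvE dp j mask))) := by
  induction L with
  | nil =>
    intro dp hlen hmask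
    have hjl : j < dp.length := by omega
    show dp = _
    rw [pvFoldA, List.foldl_nil, pvE, List.getD_eq_getElem?_getD (l := dp.getD j []),
      List.getElem?_eq_getElem hmask, Option.getD_some, List.set_getElem_self hmask,
      List.getD_eq_getElem?_getD, List.getElem?_eq_getElem hjl, Option.getD_some,
      List.set_getElem_self hjl]
  | cons i L ih =>
    intro dp hlen hmask
    have hjl : j < dp.length := by omega
    set v := max (pvE dp j mask) (pvCand P Q j mask (pvBase dp j mask) i) with hv
    have hstep : pvStepI P Q mask j dp i = dp.set j ((dp.getD j []).set mask v) := by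
      simp only [pvStepI, pvCand, pvE, hv]
    rw [List.foldl_cons, hstep]
    set dp' := dp.set j ((dp.getD j []).set mask v) with hdp'
    have hlen' : dp'.length = N := by rw [hdp', List.length_set, hlen]
    have hA : dp'.getD j [] = (dp.getD j []).set mask v := pvRowGetD_set_self dp j _ hjl
    have hmask' : mask < (dp'.getD j []).length := by rw [hA, List.length_set]; exact hmask
    rw [ih dp' hlen' hmask']
    have hE : pvE dp' j mask = v := by
      rw [pvE, hA]; exact pvGetD_set_self _ _ _ hmask
    have hB : pvBase dp' j mask = pvBase dp j mask := by
      rw [pvBase, pvBase, pvPrevRow dp' N j hlen' hN hj, pvPrevRow dp N j hlen hN hj]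
      set p := (j + N - 1) % N with hp
      by_cases hpj : p = j
      · rw [hpj, hA, pvGetD_set_ne _ _ _ _ (Ne.symm (pvXorNe mask j))]
      · rw [hdp', pvRowGetD_set_ne dp j p _ (fun he => hpj he.symm)]
    have hset : ∀ x : Int, dp'.set j ((dp'.getD j []).set mask x) = dp.set j ((dp.getD j []).set mask x) := by
      intro x
      rw [hA, List.set_set, List.set_set]
    rw [hE, hB, hset]
    rfl


-- invariant for the j-loop at a fixed mask M (rows < k updated at M, all rows done below M)
def pvInvJ (P Q : List (List Int)) (N F M k : Nat) (dp : List (List Int)) : Prop :=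
  dp.length = N ∧ (∀ j, j < N → (dp.getD j []).length = F) ∧
  ∀ j, j < N → ∀ m, m < F → pvE dp j m = if m < M ∨ (m = M ∧ j < k) then pvSolveW P Q N j m else 0

theorem pvStepJ_inv (P Q : List (List Int)) (N F M : Nat) (hN : 1 ≤ N) (hM : M < F)
    (k : Nat) (hk : k < N) (dp : List (List Int)) (hinv : pvInvJ P Q N F M k dp) :
    pvInvJ P Q N F M (k + 1) (pvStepJ P Q N M dp k) := by
  obtain ⟨hlen, hrows, hent⟩ := hinv
  rw [pvStepJ]
  by_cases hbit : M.testBit k = true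
  · rw [if_pos hbit]
    rw [pvIFold P Q M k N hN hk (List.range N) dp hlen (by rw [hrows k hk]; exact hM)]
    have hE0 : pvE dp k M = 0 := by
      rw [hent k hk M hM, if_neg (by omega)]
    have hp : (k + N - 1) % N < N := Nat.mod_lt _ (by omega)
    have hsublt : M ^^^ (1 <<< k) < M := pvXorLt M k hbit
    have hb : pvBase dp k M = pvSolveW P Q N ((k + N - 1) % N) (M ^^^ (1 <<< k)) := by
      rw [pvBase, pvPrevRow dp N k hlen hN hk]
      show pvE dp ((k + N - 1) % N) (M ^^^ (1 <<< k)) = _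
      rw [hent _ hp _ (lt_trans hsublt hM), if_pos (Or.inl hsublt)]
    have hval : pvFoldA P Q k M (pvBase dp k M) (List.range N) (pvE dp k M) = pvSolveW P Q N k M := by
      rw [hE0, hb, pvFoldA_main P Q k M _ (List.range N) (pvSolveW_nonneg P Q N _ _) (List.mem_range.mpr hk) hbit]
      conv_rhs => rw [pvSolveW]
      rw [dif_pos hbit]
      rfl
    rw [hval]
    have hkl : k < dp.length := by omega
    refine ⟨by rw [List.length_set, hlen], ?_, ?_⟩
    · intro j hjN
      by_cases hjk : j = k
      · subst hjk
        rw [pvRowGetD_set_self _ _ _ hkl, List.length_set]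
        exact hrows j hjN
      · rw [pvRowGetD_set_ne _ _ _ _ (fun he => hjk he.symm)]
        exact hrows j hjN
    · intro j hjN m hm
      by_cases hjk : j = k
      · subst hjk
        rw [pvE, pvRowGetD_set_self _ _ _ hkl]
        by_cases hmM : m = M
        · subst hmM
          rw [pvGetD_set_self _ _ _ (by rw [hrows j hjN]; exact hM), if_pos (by omega)]
        · rw [pvGetD_set_ne _ _ _ _ (fun he => hmM he.symm)]
          show pvE dp j m = _
          rw [hent j hjN m hm]
          by_cases hmlt : m < M
          · rw [if_pos (by omega), if_pos (by omega)]
          · rw [if_neg (by omega), if_neg (by omega)]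
      · rw [pvE, pvRowGetD_set_ne _ _ _ _ (fun he => hjk he.symm)]
        show pvE dp j m = _
        rw [hent j hjN m hm,
          if_congr (show (m < M ∨ (m = M ∧ j < k)) ↔ (m < M ∨ (m = M ∧ j < k + 1)) by
            constructor <;> (intro h; omega)) rfl rfl]
  · rw [if_neg hbit]
    refine ⟨hlen, hrows, ?_⟩
    intro j hjN m hm
    rw [hent j hjN m hm]
    by_cases hmlt : m < M
    · rw [if_pos (by omega), if_pos (by omega)]
    · by_cases hjm : m = M ∧ j = k
      · obtain ⟨h1, h2⟩ := hjm
        subst h1; subst h2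
        rw [if_neg (by omega), if_pos (by omega), pvSolveW, dif_neg hbit]
      · by_cases hc : m = M ∧ j < k
        · rw [if_pos (by omega), if_pos (by omega)]
        · rw [if_neg (by omega), if_neg (by omega)]

theorem pvJFold (P Q : List (List Int)) (N F M : Nat) (hN : 1 ≤ N) (hM : M < F) :
    ∀ (cnt k : Nat) (dp : List (List Int)), k + cnt ≤ N → pvInvJ P Q N F M k dp →
      pvInvJ P Q N F M (k + cnt) ((List.range' k cnt).foldl (pvStepJ P Q N M) dp) := by
  intro cnt
  induction cnt with
  | zero => intro k dp _ hinv; simpa using hinv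
  | succ cnt ih =>
    intro k dp hkn hinv
    rw [List.range'_succ, List.foldl_cons]
    have h1 := pvStepJ_inv P Q N F M hN hM k (by omega) dp hinv
    have h2 := ih (k + 1) _ (by omega) h1
    rw [show k + (cnt + 1) = k + 1 + cnt by omega]
    exact h2

theorem pvInvJ_step (P Q : List (List Int)) (N F M : Nat) (dp : List (List Int))
    (h : pvInvJ P Q N F M N dp) : pvInvJ P Q N F (M + 1) 0 dp := by
  obtain ⟨h1, h2, h3⟩ := h
  refine ⟨h1, h2, ?_⟩
  intro j hj m hm
  rw [h3 j hj m hm,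
    if_congr (show (m < M ∨ (m = M ∧ j < N)) ↔ (m < M + 1 ∨ (m = M + 1 ∧ j < 0)) by
      constructor <;> (intro h; omega)) rfl rfl]

theorem pvMaskFold (P Q : List (List Int)) (N F : Nat) (hN : 1 ≤ N) :
    ∀ (cnt M : Nat) (dp : List (List Int)), M + cnt ≤ F → pvInvJ P Q N F M 0 dp →
      pvInvJ P Q N F (M + cnt) 0 ((List.range' M cnt).foldl (pvStepMask P Q N) dp) := by
  intro cnt
  induction cnt with
  | zero => intro M dp _ hinv; simpa using hinv
  | succ cnt ih =>
    intro M dp hMF hinv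
    rw [List.range'_succ, List.foldl_cons]
    have h1 : pvInvJ P Q N F M N (pvStepMask P Q N dp M) := by
      have := pvJFold P Q N F M hN (by omega) N 0 dp (by omega) hinv
      rw [Nat.zero_add] at this
      rw [pvStepMask, List.range_eq_range']
      exact this
    have h2 := ih (M + 1) _ (by omega) (pvInvJ_step P Q N F M _ h1)
    rw [show M + (cnt + 1) = M + 1 + cnt by omega]
    exact h2

theorem pvInvJ_base (P Q : List (List Int)) (N F : Nat) :
    pvInvJ P Q N F 0 0 (List.replicate N (List.replicate F 0)) := by
  refine ⟨List.length_replicate, ?_, ?_⟩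
  · intro j hj
    rw [List.getD_eq_getElem?_getD, List.getElem?_replicate, if_pos hj]
    simp
  · intro j hj m hm
    rw [if_neg (by omega)]
    simp [pvE, List.getD_eq_getElem?_getD, hj, hm]

-- L3 (bridge): on masks below 2^(j+1) the wrap-reading recursion A's table carries
-- equals B's recursion with the j = 0 base case (the wrap read lands on mask 0)
theorem pvBridge (P Q : List (List Int)) (N : Nat) (hN : 1 ≤ N) :
    ∀ j, j < N → ∀ m, m < 2 ^ (j + 1) → pvSolveW P Q N j m = pvSolveB P Q N j m := by
  intro j
  induction j with
  | zero =>
    intro _ m hm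
    rw [pvSolveW, pvSolveB]
    by_cases hbit : m.testBit 0 = true
    · rw [dif_pos hbit, if_pos hbit]
      have hm1 : m = 1 := by
        interval_cases m
        · simp [Nat.testBit] at hbit
        · rfl
      subst hm1
      have hx : (1 : Nat) ^^^ (1 <<< 0) = 0 := by decide
      rw [hx, pvSolveW, dif_neg (by simp [Nat.zero_testBit])]
      simp
    · rw [dif_neg hbit, if_neg (by simpa using hbit)]
  | succ j ih =>
    intro hjN m hm
    rw [pvSolveW, pvSolveB]
    by_cases hbit : m.testBit (j + 1) = true
    · rw [dif_pos hbit, if_pos hbit]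
      have hrow : (j + 1 + N - 1) % N = j := by
        rw [show j + 1 + N - 1 = j + N by omega, Nat.add_mod_right, Nat.mod_eq_of_lt (by omega)]
      have hpow : (1 : Nat) <<< (j + 1) = 2 ^ (j + 1) := by simp [Nat.shiftLeft_eq]
      have hm' : m ^^^ (1 <<< (j + 1)) < 2 ^ (j + 1) := by
        rw [hpow]
        apply Nat.lt_of_testBit (j + 1)
        · simp [Nat.testBit_xor, hbit]
        · simp [Nat.testBit_two_pow_self]
        · intro k hk
          have hmk : m.testBit k = false :=
            Nat.testBit_lt_two_pow (lt_of_lt_of_le hm (Nat.pow_le_pow_right (by omega) (by omega)))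
          simp [Nat.testBit_xor, hmk, Nat.testBit_two_pow_of_ne (by omega : j + 1 ≠ k)]
      rw [hrow, ih (by omega) _ hm']
    · rw [dif_neg hbit, if_neg (by simpa using hbit)]

theorem pvMain (n : Int) (P Q : List (List Int)) (h1 : 1 ≤ n) :
    max_mixed_doubles_advantage n P Q = max_mixed_doubles_advantage_alt n P Q := by
  simp only [max_mixed_doubles_advantage, max_mixed_doubles_advantage_alt]
  set N := n.toNat with hNdef
  have hN1 : 1 ≤ N := by omega
  set F := 1 <<< N with hFdef
  have hF1 : 1 ≤ F := by rw [hFdef, Nat.shiftLeft_eq, Nat.one_mul]; exact Nat.one_le_two_pow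
  have hdpf : pvInvJ P Q N F F 0 ((List.range F).foldl (pvStepMask P Q N) (List.replicate N (List.replicate F 0))) := by
    rw [List.range_eq_range']
    have := pvMaskFold P Q N F hN1 F 0 _ (by omega) (pvInvJ_base P Q N F)
    rwa [Nat.zero_add] at this
  set dpf := (List.range F).foldl (pvStepMask P Q N) (List.replicate N (List.replicate F 0)) with hdpfdef
  obtain ⟨hlen, hrows, hent⟩ := hdpf
  have hrow : (PySem.List.pyGet? dpf (-1)).getD [] = dpf.getD (N - 1) [] := by
    have h := pvPrevRow dpf N 0 hlen hN1 (by omega)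
    rw [show ((0 : Nat) : Int) - 1 = -1 by norm_num, Nat.zero_add,
      Nat.mod_eq_of_lt (by omega : N - 1 < N)] at h
    exact h
  have hFpow : F = 2 ^ (N - 1 + 1) := by
    rw [hFdef, Nat.shiftLeft_eq, Nat.one_mul, show N - 1 + 1 = N by omega]
  have hrowlist : dpf.getD (N - 1) [] = (List.range F).map (fun mask => pvSolveB P Q N (N - 1) mask) := by
    apply List.ext_getElem
    · rw [hrows (N - 1) (by omega), List.length_map, List.length_range]
    · intro m hm1 hm2
      have hmF : m < F := by rwa [hrows (N - 1) (by omega)] at hm1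
      rw [List.getElem_map, List.getElem_range]
      have hE := hent (N - 1) (by omega) m hmF
      rw [if_pos (Or.inl hmF), pvE, List.getD_eq_getElem?_getD, List.getElem?_eq_getElem hm1,
        Option.getD_some] at hE
      rw [hE]
      exact pvBridge P Q N hN1 (N - 1) (by omega) m (by rwa [← hFpow])
  rw [hrow, hrowlist]

-- ===== VERDICT (by name: the statement is the Claim_ definition above) =====
theorem max_mixed_doubles_advantage_spec : Claim_equal_max_mixed_doubles_advantage := by
  intro n P Q _ hpre
  unfold Spec_max_mixed_doubles_advantage
  exact pvMain n P Q hpre.1
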